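-- pv_equiv track=rewrite | github.com/jvccerqueira/IIE-p2 | inferencia_estatistica.py | tabela_sinais
-- ===== SOURCE A (Python) =====
-- def tabela_sinais(antes, depois):
--     sinais = []
--     for i in range(len(antes)):
--         if antes[i] > depois[i]:
--             sinais.append(-1)
--         elif antes[i] < depois[i]:
--             sinais.append(1)
--         else:
--             sinais.append(0)
--     n_pos = sinais.count(1)
--     n_neg = sinais.count(-1)
--     return n_pos, n_neg
-- ===== SOURCE B (Python) =====
-- def tabela_sinais(antes, depois):
--     # Pair the lists and count directly: no indices, no intermediate sign list.
--     pares = list(zip(antes, depois))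
--     n_pos = sum(1 for a, d in pares if a < d)
--     n_neg = sum(1 for a, d in pares if a > d)
--     return n_pos, n_neg
-- ===== Notes on version B (the rewrite author's own statement) =====
-- stated objective: idiomatic
-- what changed: Replaces index-driven build-a-sign-list-then-count-twice with zipping the two lists into pairs and counting the two predicates directly over the pairs.
import Mathlib
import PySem

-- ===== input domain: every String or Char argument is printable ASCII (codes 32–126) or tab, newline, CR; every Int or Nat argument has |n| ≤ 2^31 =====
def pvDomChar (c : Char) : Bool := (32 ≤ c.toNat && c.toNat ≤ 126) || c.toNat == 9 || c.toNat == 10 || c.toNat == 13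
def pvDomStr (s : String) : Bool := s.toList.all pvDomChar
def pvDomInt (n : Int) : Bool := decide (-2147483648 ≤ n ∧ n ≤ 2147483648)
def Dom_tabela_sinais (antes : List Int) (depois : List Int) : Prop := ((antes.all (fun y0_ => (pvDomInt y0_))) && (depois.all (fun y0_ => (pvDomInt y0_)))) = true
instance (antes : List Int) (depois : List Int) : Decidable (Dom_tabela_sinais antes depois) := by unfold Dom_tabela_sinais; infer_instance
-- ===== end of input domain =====

-- B replaces A's index-driven build-a-sign-list-then-count-twice with zipping the lists into pairs and counting two predicates over the pairs (idiomatic).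


-- ===== PORT A =====
def tabela_sinais (antes : List Int) (depois : List Int) : Int × Int :=
  let sinais : List Int :=
    (PySem.List.pyRange 0 antes.length 1).foldl
      (fun sinais i =>
        if PySem.List.pyGetD antes i 0 > PySem.List.pyGetD depois i 0 then sinais ++ [-1]
        else if PySem.List.pyGetD antes i 0 < PySem.List.pyGetD depois i 0 then sinais ++ [1]
        else sinais ++ [0]) []
  ((PySem.List.count sinais 1 : Int), (PySem.List.count sinais (-1) : Int))

-- ===== PORT B =====
def tabela_sinais_alt (antes : List Int) (depois : List Int) : Int × Int :=
  let pares := antes.zip depois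
  let n_pos : Int := (pares.countP (fun p => p.1 < p.2) : Int)
  let n_neg : Int := (pares.countP (fun p => p.2 < p.1) : Int)
  (n_pos, n_neg)

-- ===== PRECONDITION & SPEC =====
-- Pre_ excludes exactly the inputs on which A raises IndexError: depois shorter than antes.
def Pre_tabela_sinais (antes : List Int) (depois : List Int) : Prop :=
  antes.length ≤ depois.length
instance (antes : List Int) (depois : List Int) : Decidable (Pre_tabela_sinais antes depois) := by
  unfold Pre_tabela_sinais; infer_instance

def pvWitness_tabela_sinais : List Int × List Int := ([3, 1, 2], [1, 1, 5])

def Spec_tabela_sinais (antes : List Int) (depois : List Int) (out : Int × Int) : Prop := out = tabela_sinais_alt antes depois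
instance (antes : List Int) (depois : List Int) (out : Int × Int) : Decidable (Spec_tabela_sinais antes depois out) := by
  unfold Spec_tabela_sinais; infer_instance

-- ===== CLAIM (what is proved, stated in full; the proofs are below) =====
def Claim_equal_tabela_sinais : Prop := ∀ (antes : List Int) (depois : List Int), Dom_tabela_sinais antes depois → Pre_tabela_sinais antes depois → Spec_tabela_sinais antes depois (tabela_sinais antes depois)

-- ===== LEMMAS AND PROOFS =====

-- the per-index sign A appends
def pvSgn (antes depois : List Int) (i : Int) : Int :=
  if PySem.List.pyGetD antes i 0 > PySem.List.pyGetD depois i 0 then -1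
  else if PySem.List.pyGetD antes i 0 < PySem.List.pyGetD depois i 0 then 1
  else 0

-- the per-pair sign on zipped elements
def pvSgnPair (p : Int × Int) : Int :=
  if p.2 < p.1 then -1 else if p.1 < p.2 then 1 else 0

lemma pvSgn_list_eq_zip (antes depois : List Int) (h : antes.length ≤ depois.length) :
    (PySem.List.pyRange 0 antes.length 1).map (pvSgn antes depois)
      = (antes.zip depois).map pvSgnPair := by
  apply List.ext_getElem
  · simp [PySem.List.length_pyRange_one]; omega
  · intro k h1 h2
    have hk : k < antes.length := by
      simpa [PySem.List.length_pyRange_one] using h1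
    have hkd : k < depois.length := lt_of_lt_of_le hk h
    simp only [List.getElem_map, PySem.List.getElem_pyRange_one, zero_add]
    unfold pvSgn pvSgnPair
    simp [PySem.List.pyGetD_natCast, List.getD_eq_getElem?_getD, List.getElem?_eq_getElem hk,
          List.getElem?_eq_getElem hkd, List.getElem_zip, gt_iff_lt]

lemma tabela_sinais_eq_counts (antes depois : List Int) :
    tabela_sinais antes depois =
      ((((PySem.List.pyRange 0 antes.length 1).map (pvSgn antes depois)).count 1 : Int),
       (((PySem.List.pyRange 0 antes.length 1).map (pvSgn antes depois)).count (-1) : Int)) := by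
  unfold tabela_sinais
  have h : (PySem.List.pyRange 0 antes.length 1).foldl
      (fun sinais i =>
        if PySem.List.pyGetD antes i 0 > PySem.List.pyGetD depois i 0 then sinais ++ [-1]
        else if PySem.List.pyGetD antes i 0 < PySem.List.pyGetD depois i 0 then sinais ++ [1]
        else sinais ++ [0]) ([] : List Int)
      = (PySem.List.pyRange 0 antes.length 1).foldl
          (fun sinais i => sinais ++ [pvSgn antes depois i]) [] := by
    apply PySem.List.foldl_congr_mem
    intro acc i _
    unfold pvSgn
    split_ifs <;> rfl
  rw [h, PySem.List.foldl_append_singleton_eq_map]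
  simp [PySem.List.count_eq]

lemma count_sgnPair_one (l : List (Int × Int)) :
    (l.map pvSgnPair).count 1 = l.countP (fun p => p.1 < p.2) := by
  rw [List.count_eq_countP, List.countP_map]
  apply List.countP_congr
  intro p _
  unfold pvSgnPair
  rcases lt_trichotomy p.1 p.2 with h | h | h <;>
    simp [h, lt_asymm, Function.comp]

lemma count_sgnPair_neg_one (l : List (Int × Int)) :
    (l.map pvSgnPair).count (-1) = l.countP (fun p => p.2 < p.1) := by
  rw [List.count_eq_countP, List.countP_map]
  apply List.countP_congr
  intro p _
  unfold pvSgnPair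
  rcases lt_trichotomy p.1 p.2 with h | h | h <;>
    simp [h, lt_asymm, Function.comp]

theorem tabela_sinais_eq (antes depois : List Int) (h : antes.length ≤ depois.length) :
    tabela_sinais antes depois = tabela_sinais_alt antes depois := by
  rw [tabela_sinais_eq_counts, pvSgn_list_eq_zip antes depois h]
  unfold tabela_sinais_alt
  simp [count_sgnPair_one, count_sgnPair_neg_one]

-- ===== VERDICT (by name: the statement is the Claim_ definition above) =====
theorem tabela_sinais_spec : Claim_equal_tabela_sinais := by
  intro antes depois _ hpre
  unfold Spec_tabela_sinais
  exact tabela_sinais_eq antes depois hpre
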